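-- pv_equiv track=rewrite | github.com/autoplug/Assessment | wise_iman/test1.py | solution
-- ===== SOURCE A (Python) =====
-- def solution(requests):
--     result = []
--     result.append(200)
--     for i in range(1, len(requests)):
--         if requests[max(i-5, 0):i].count(requests[i]) >= 2:
--             result.append(400)
--             requests[i] = ""
--             continue
--         if requests[max(i-30, 0):i].count(requests[i]) >= 5:
--             result.append(400)
--             requests[i] = ""
--             continue
--         result.append(200)
--     return result
-- ===== SOURCE B (Python) =====
-- def solution(requests):
--     # Sliding-window counters: a single pass, instead of re-slicing and counting both windows per index.
--     # NOTE: unlike A, B does not blank entries of `requests` in place; the return value is identical.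
--     result = [200]
--     if len(requests) <= 1:
--         return result
--     v0 = requests[0]
--     c5 = {v0: 1}
--     c30 = {v0: 1}
--     window = [v0]
--     h5 = 0
--     h30 = 0
--     for v in requests[1:]:
--         if c5.get(v, 0) >= 2 or c30.get(v, 0) >= 5:
--             result.append(400)
--             v = ""
--         else:
--             result.append(200)
--         window.append(v)
--         c5[v] = c5.get(v, 0) + 1
--         c30[v] = c30.get(v, 0) + 1
--         if len(window) - h5 > 5:
--             u = window[h5]
--             c5[u] = c5.get(u, 0) - 1
--             h5 += 1
--         if len(window) - h30 > 30:
--             u = window[h30]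
--             c30[u] = c30.get(u, 0) - 1
--             h30 += 1
--     return result
-- ===== Notes on version B (the rewrite author's own statement) =====
-- stated objective: alternative
-- what changed: Replaces per-index slicing and counting of the two windows with a single pass maintaining sliding-window hash-map counters (sizes 5 and 30), evicting the element that falls off each window; B does not replicate A's in-place blanking of the input list (return value is identical).
import Mathlib
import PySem

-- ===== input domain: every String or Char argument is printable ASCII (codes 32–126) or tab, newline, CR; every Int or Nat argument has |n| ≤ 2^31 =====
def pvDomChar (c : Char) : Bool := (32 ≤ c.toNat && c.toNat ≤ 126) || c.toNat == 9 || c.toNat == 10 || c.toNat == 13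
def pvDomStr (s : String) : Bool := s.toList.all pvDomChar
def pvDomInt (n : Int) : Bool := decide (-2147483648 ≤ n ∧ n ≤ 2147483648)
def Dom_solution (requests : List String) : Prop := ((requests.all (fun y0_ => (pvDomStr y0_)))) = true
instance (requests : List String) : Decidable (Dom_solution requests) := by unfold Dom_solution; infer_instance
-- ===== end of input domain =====

-- B replaces A's per-index window slicing and counting by a single pass that maintains sliding-window
-- hash-map counters (window sizes 5 and 30). A mutates `requests` in place (blanks blocked entries);
-- B does not — the equivalence proved here is about the RETURN value.

-- ===== PORT A =====
-- one loop iteration of A: state (result, requests); A mutates requests in place (requests[i] = "")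
def stepA (st : List Int × List String) (i : Int) : List Int × List String :=
  let result := st.1
  let reqs := st.2
  let v := PySem.List.pyGetD reqs i ""
  if 2 ≤ PySem.List.count (PySem.List.slice reqs (some (max (i - 5) 0)) (some i)) v then
    (result ++ [400], PySem.List.pySetD reqs i "")
  else if 5 ≤ PySem.List.count (PySem.List.slice reqs (some (max (i - 30) 0)) (some i)) v then
    (result ++ [400], PySem.List.pySetD reqs i "")
  else
    (result ++ [200], reqs)

def solution (requests : List String) : List Int :=
  ((PySem.List.pyRange 1 (requests.length : Int) 1).foldl stepA ([200], requests)).1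

-- ===== PORT B =====
-- one loop iteration of B: state (result, c5, c30, window, h5, h30)
def stepB (st : List Int × PySem.Dict String Int × PySem.Dict String Int × List String × Nat × Nat)
    (v : String) : List Int × PySem.Dict String Int × PySem.Dict String Int × List String × Nat × Nat :=
  let (result, c5, c30, window, h5, h30) := st
  let blocked : Bool := decide (2 ≤ c5.getD v 0) || decide (5 ≤ c30.getD v 0)
  let result := result ++ [if blocked then 400 else 200]
  let v := if blocked then "" else v
  let window := window ++ [v]
  let c5 := c5.insert v (c5.getD v 0 + 1)
  let c30 := c30.insert v (c30.getD v 0 + 1)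
  let p5 : PySem.Dict String Int × Nat :=
    if 5 < window.length - h5 then
      (c5.insert (window.getD h5 "") (c5.getD (window.getD h5 "") 0 - 1), h5 + 1)
    else (c5, h5)
  let p30 : PySem.Dict String Int × Nat :=
    if 30 < window.length - h30 then
      (c30.insert (window.getD h30 "") (c30.getD (window.getD h30 "") 0 - 1), h30 + 1)
    else (c30, h30)
  (result, p5.1, p30.1, window, p5.2, p30.2)

def solution_alt (requests : List String) : List Int :=
  if requests.length ≤ 1 then [200]
  else
    match requests with
    | [] => [200]
    | v0 :: rest =>
      (rest.foldl stepB
        ([200], PySem.Dict.empty.insert v0 1, PySem.Dict.empty.insert v0 1, [v0], 0, 0)).1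

-- ===== PRECONDITION & SPEC =====
def Spec_solution (requests : List String) (out : List Int) : Prop := out = solution_alt requests
instance (requests : List String) (out : List Int) : Decidable (Spec_solution requests out) := by unfold Spec_solution; infer_instance

-- ===== CLAIM (what is proved, stated in full; the proofs are below) =====
def Claim_equal_solution : Prop := ∀ (requests : List String), Dom_solution requests → Spec_solution requests (solution requests)

-- ===== LEMMAS AND PROOFS =====

-- reference recursion both ports are reduced to: `pre` is the processed prefix (with blanked
-- values), `rest` the remaining inputs
def goRef (pre rest : List String) : List Int :=
  match rest with
  | [] => []
  | v :: rs =>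
    if 2 ≤ (pre.drop (pre.length - 5)).count v ∨ 5 ≤ (pre.drop (pre.length - 30)).count v
    then 400 :: goRef (pre ++ [""]) rs
    else 200 :: goRef (pre ++ [v]) rs

lemma slice_last (k : Nat) (pre tl : List String) (hk : 0 < k) :
    PySem.List.slice (pre ++ tl) (some (max ((pre.length:Int) - k) 0)) (some (pre.length:Int))
      = pre.drop (pre.length - k) := by
  have h : max ((pre.length:Int) - (k:Int)) 0 = ((pre.length - k : Nat) : Int) := by omega
  rw [h, PySem.List.slice_natCast, List.drop_append_of_le_length (by omega)]
  rw [List.take_append_of_le_length (by simp)]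
  simp

lemma stepA_eq (pre : List String) (v : String) (rs : List String) (res : List Int) :
    stepA (res, pre ++ v :: rs) (pre.length : Int) =
      if 2 ≤ (pre.drop (pre.length - 5)).count v ∨ 5 ≤ (pre.drop (pre.length - 30)).count v
      then (res ++ [400], (pre ++ [""]) ++ rs)
      else (res ++ [200], (pre ++ [v]) ++ rs) := by
  have h5 : (5:Int) = ((5:Nat):Int) := by norm_num
  have h30 : (30:Int) = ((30:Nat):Int) := by norm_num
  unfold stepA
  simp only [PySem.List.pyGetD_natCast]
  rw [h5, h30, slice_last 5 pre (v :: rs) (by norm_num), slice_last 30 pre (v :: rs) (by norm_num)]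
  simp only [List.getD, PySem.List.count_eq, PySem.List.pySetD_natCast]
  simp only [List.getElem?_append_right (le_refl pre.length), Nat.sub_self,
    List.getElem?_cons_zero, Option.getD_some]
  by_cases hA : 2 ≤ (pre.drop (pre.length - 5)).count v
  · simp [hA, List.set_append_right, List.append_assoc]
  · by_cases hB : 5 ≤ (pre.drop (pre.length - 30)).count v
    · simp [hA, hB, List.set_append_right, List.append_assoc]
    · simp [hA, hB, List.append_assoc]

lemma A_loop (rest pre : List String) (res : List Int) :
    ((PySem.List.pyRange (pre.length : Int) ((pre.length : Int) + (rest.length : Int)) 1).foldl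
      stepA (res, pre ++ rest)).1 = res ++ goRef pre rest := by
  induction rest generalizing pre res with
  | nil => simp [goRef, PySem.List.pyRange_one_eq_nil]
  | cons v rs ih =>
    rw [PySem.List.pyRange_one_cons (by simp only [List.length_cons]; push_cast; omega)]
    rw [List.foldl_cons, stepA_eq]
    by_cases hb : 2 ≤ (pre.drop (pre.length - 5)).count v ∨ 5 ≤ (pre.drop (pre.length - 30)).count v
    · simp only [hb, if_pos]
      have harg : ((pre.length:Int)) + (((v :: rs).length : Nat) : Int) = ((pre ++ [""]).length : Int) + (rs.length : Int) := by
        simp; ring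
      have harg2 : ((pre.length:Int)) + 1 = ((pre ++ [""]).length : Int) := by simp
      rw [harg, harg2, ih (pre ++ [""]) (res ++ [400])]
      simp [goRef, hb]
    · simp only [hb, if_neg, not_false_iff]
      have harg : ((pre.length:Int)) + (((v :: rs).length : Nat) : Int) = ((pre ++ [v]).length : Int) + (rs.length : Int) := by
        simp; ring
      have harg2 : ((pre.length:Int)) + 1 = ((pre ++ [v]).length : Int) := by simp
      rw [harg, harg2, ih (pre ++ [v]) (res ++ [200])]
      simp [goRef, hb]

lemma B_window_step (k : Nat) (hk : 0 < k) (pre : List String) (v' : String)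
    (c : PySem.Dict String Int) (h : Nat) (hh : h = pre.length - k)
    (hc : ∀ w, c.getD w 0 = (((pre.drop h).count w : Int))) :
    (if k < (pre ++ [v']).length - h then
       ((c.insert v' (c.getD v' 0 + 1)).insert ((pre ++ [v']).getD h "")
          ((c.insert v' (c.getD v' 0 + 1)).getD ((pre ++ [v']).getD h "") 0 - 1), h + 1)
     else (c.insert v' (c.getD v' 0 + 1), h)).2 = (pre ++ [v']).length - k ∧
    ∀ w, (if k < (pre ++ [v']).length - h then
       ((c.insert v' (c.getD v' 0 + 1)).insert ((pre ++ [v']).getD h "")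
          ((c.insert v' (c.getD v' 0 + 1)).getD ((pre ++ [v']).getD h "") 0 - 1), h + 1)
     else (c.insert v' (c.getD v' 0 + 1), h)).1.getD w 0
       = ((((pre ++ [v']).drop ((pre ++ [v']).length - k)).count w : Int)) := by
  have e1 : ∀ x : String, (c.insert v' (c.getD v' 0 + 1)).getD x 0
      = (((pre.drop h).count x : Int)) + (if x = v' then 1 else 0) := by
    intro x
    rw [PySem.Dict.getD_insert]
    split_ifs with hx
    · subst hx; rw [hc]
    · rw [hc]; ring
  by_cases hev : k < (pre ++ [v']).length - h
  · have hkle : k ≤ pre.length := by simp at hev; omega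
    have hlt : h < pre.length := by omega
    have hu : (pre ++ [v']).getD h "" = pre[h] := by
      simp [List.getD, List.getElem?_append_left hlt, List.getElem?_eq_getElem hlt]
    have hdrop' : (pre ++ [v']).drop ((pre ++ [v']).length - k) = pre.drop (h+1) ++ [v'] := by
      have hx : (pre ++ [v']).length - k = h + 1 := by simp; omega
      rw [hx, List.drop_append_of_le_length (by omega)]
    have e2 : ∀ x : String, ((pre.drop h).count x : Int)
        = (if x = pre[h] then 1 else 0) + (((pre.drop (h+1)).count x : Int)) := by
      intro x
      rw [List.drop_eq_getElem_cons hlt, List.count_cons]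
      rcases eq_or_ne x pre[h] with hx | hx
      · simp [hx]; ring
      · simp [hx, Ne.symm hx]
    have e3 : ∀ x : String, (((pre.drop (h+1) ++ [v']).count x : Int))
        = (((pre.drop (h+1)).count x : Int)) + (if x = v' then 1 else 0) := by
      intro x
      rw [List.count_append]
      rcases eq_or_ne x v' with hx | hx
      · simp [hx]
      · simp [hx, Ne.symm hx]
    refine ⟨by simp only [hev, if_pos]; simp; omega, ?_⟩
    intro w
    simp only [hev, if_pos, hu, hdrop']
    rw [PySem.Dict.getD_insert, e3]
    rcases eq_or_ne w pre[h] with hw1 | hw1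
    · rw [hw1, if_pos rfl, e1, e2, if_pos rfl]
      split_ifs <;> ring
    · rw [if_neg hw1, e1, e2, if_neg hw1]
      split_ifs <;> ring
  · have hlen : pre.length + 1 ≤ k := by simp at hev; omega
    have hz : h = 0 := by omega
    have hx0 : (pre ++ [v']).length - k = 0 := by simp; omega
    refine ⟨by simp only [hev, if_neg, not_false_iff]; simp; omega, ?_⟩
    intro w
    simp only [hev, if_neg, not_false_iff, hx0, List.drop_zero]
    rw [e1, hz, List.drop_zero, List.count_append]
    rcases eq_or_ne w v' with hx | hx
    · simp [hx]
    · simp [hx, Ne.symm hx]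

lemma B_loop (rest : List String) (pre : List String) (res : List Int)
    (c5 c30 : PySem.Dict String Int) (h5 h30 : Nat)
    (hh5 : h5 = pre.length - 5) (hh30 : h30 = pre.length - 30)
    (hc5 : ∀ w, c5.getD w 0 = (((pre.drop h5).count w : Int)))
    (hc30 : ∀ w, c30.getD w 0 = (((pre.drop h30).count w : Int))) :
    (rest.foldl stepB (res, c5, c30, pre, h5, h30)).1 = res ++ goRef pre rest := by
  induction rest generalizing pre res c5 c30 h5 h30 with
  | nil => simp [goRef]
  | cons v rs ih =>
    rw [List.foldl_cons]
    have hb : (decide (2 ≤ c5.getD v 0) || decide (5 ≤ c30.getD v 0)) =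
        decide (2 ≤ (pre.drop (pre.length - 5)).count v ∨ 5 ≤ (pre.drop (pre.length - 30)).count v) := by
      rw [hc5, hc30, hh5, hh30]
      rcases Nat.lt_or_ge ((pre.drop (pre.length - 5)).count v) 2 with h1 | h1 <;>
        rcases Nat.lt_or_ge ((pre.drop (pre.length - 30)).count v) 5 with h2 | h2 <;>
          simp_all
    set b : Prop := 2 ≤ (pre.drop (pre.length - 5)).count v ∨ 5 ≤ (pre.drop (pre.length - 30)).count v with hbdef
    set v' : String := if decide b then "" else v with hv'
    have h5' := B_window_step 5 (by norm_num) pre v' c5 h5 hh5 hc5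
    have h30' := B_window_step 30 (by norm_num) pre v' c30 h30 hh30 hc30
    show (List.foldl stepB (stepB (res, c5, c30, pre, h5, h30) v) rs).1 = _
    rw [show stepB (res, c5, c30, pre, h5, h30) v =
        (res ++ [if decide b then 400 else 200],
         (if 5 < (pre ++ [v']).length - h5 then
            ((c5.insert v' (c5.getD v' 0 + 1)).insert ((pre ++ [v']).getD h5 "")
               ((c5.insert v' (c5.getD v' 0 + 1)).getD ((pre ++ [v']).getD h5 "") 0 - 1), h5 + 1)
          else (c5.insert v' (c5.getD v' 0 + 1), h5)).1,
         (if 30 < (pre ++ [v']).length - h30 then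
            ((c30.insert v' (c30.getD v' 0 + 1)).insert ((pre ++ [v']).getD h30 "")
               ((c30.insert v' (c30.getD v' 0 + 1)).getD ((pre ++ [v']).getD h30 "") 0 - 1), h30 + 1)
          else (c30.insert v' (c30.getD v' 0 + 1), h30)).1,
         pre ++ [v'],
         (if 5 < (pre ++ [v']).length - h5 then
            ((c5.insert v' (c5.getD v' 0 + 1)).insert ((pre ++ [v']).getD h5 "")
               ((c5.insert v' (c5.getD v' 0 + 1)).getD ((pre ++ [v']).getD h5 "") 0 - 1), h5 + 1)
          else (c5.insert v' (c5.getD v' 0 + 1), h5)).2,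
         (if 30 < (pre ++ [v']).length - h30 then
            ((c30.insert v' (c30.getD v' 0 + 1)).insert ((pre ++ [v']).getD h30 "")
               ((c30.insert v' (c30.getD v' 0 + 1)).getD ((pre ++ [v']).getD h30 "") 0 - 1), h30 + 1)
          else (c30.insert v' (c30.getD v' 0 + 1), h30)).2) from by
      simp only [stepB, hb]
      rfl]
    have hc5' : ∀ w, (if 5 < (pre ++ [v']).length - h5 then
            ((c5.insert v' (c5.getD v' 0 + 1)).insert ((pre ++ [v']).getD h5 "")
               ((c5.insert v' (c5.getD v' 0 + 1)).getD ((pre ++ [v']).getD h5 "") 0 - 1), h5 + 1)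
          else (c5.insert v' (c5.getD v' 0 + 1), h5)).1.getD w 0
        = ((((pre ++ [v']).drop ((if 5 < (pre ++ [v']).length - h5 then
            ((c5.insert v' (c5.getD v' 0 + 1)).insert ((pre ++ [v']).getD h5 "")
               ((c5.insert v' (c5.getD v' 0 + 1)).getD ((pre ++ [v']).getD h5 "") 0 - 1), h5 + 1)
          else (c5.insert v' (c5.getD v' 0 + 1), h5)).2)).count w : Int)) := by
      intro w; rw [h5'.1]; exact h5'.2 w
    have hc30' : ∀ w, (if 30 < (pre ++ [v']).length - h30 then
            ((c30.insert v' (c30.getD v' 0 + 1)).insert ((pre ++ [v']).getD h30 "")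
               ((c30.insert v' (c30.getD v' 0 + 1)).getD ((pre ++ [v']).getD h30 "") 0 - 1), h30 + 1)
          else (c30.insert v' (c30.getD v' 0 + 1), h30)).1.getD w 0
        = ((((pre ++ [v']).drop ((if 30 < (pre ++ [v']).length - h30 then
            ((c30.insert v' (c30.getD v' 0 + 1)).insert ((pre ++ [v']).getD h30 "")
               ((c30.insert v' (c30.getD v' 0 + 1)).getD ((pre ++ [v']).getD h30 "") 0 - 1), h30 + 1)
          else (c30.insert v' (c30.getD v' 0 + 1), h30)).2)).count w : Int)) := by
      intro w; rw [h30'.1]; exact h30'.2 w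
    rw [ih (pre ++ [v']) _ _ _ _ _ h5'.1 h30'.1 hc5' hc30']
    by_cases hbb : b
    · simp only [hbdef] at hbb
      simp [goRef, hbb, hv', hbdef]
    · simp only [hbdef] at hbb
      simp [goRef, hbb, hv', hbdef]

lemma solution_eq (r0 : String) (rs : List String) :
    solution (r0 :: rs) = 200 :: goRef [r0] rs := by
  unfold solution
  have key := A_loop rs [r0] [200]
  simp only [List.length_singleton, Nat.cast_one, List.singleton_append] at key
  rw [show ((r0 :: rs).length : Int) = 1 + (rs.length : Int) by simp; ring, key]

lemma solution_alt_eq (r0 : String) (rs : List String) :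
    solution_alt (r0 :: rs) = 200 :: goRef [r0] rs := by
  cases rs with
  | nil => simp [solution_alt, goRef]
  | cons v rs' =>
    have hc : ∀ w, (PySem.Dict.empty.insert r0 (1:Int)).getD w 0
        = (((([r0] : List String).drop 0).count w : Int)) := by
      intro w
      rw [PySem.Dict.getD_insert]
      rcases eq_or_ne w r0 with hw | hw
      · simp [hw]
      · simp [hw, Ne.symm hw]
    have := B_loop (v :: rs') [r0] [200] (PySem.Dict.empty.insert r0 1)
      (PySem.Dict.empty.insert r0 1) 0 0 (by simp) (by simp) hc hc
    unfold solution_alt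
    simp only [List.length_cons, show ¬ (rs'.length + 1 + 1 ≤ 1) by omega, if_neg, not_false_iff]
    rw [this]
    rfl

-- ===== VERDICT (by name: the statement is the Claim_ definition above) =====
theorem solution_spec : Claim_equal_solution := by
  intro requests _
  unfold Spec_solution
  cases requests with
  | nil => decide
  | cons r0 rs => rw [solution_eq, solution_alt_eq]
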